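-- pv_equiv track=rewrite | github.com/aastrand/aoc2019 | 6/solve.py | remove_common_elements_from_end
-- ===== SOURCE A (Python) =====
-- def remove_common_elements_from_end(l1, l2):
--     while True:
--         if (len(l1) > 0 and len(l2) > 0) and l1[-1] == l2[-1]:
--             l1.pop()
--             l2.pop()
--         else:
--             break
--
--     return l1, l2
-- ===== SOURCE B (Python) =====
-- def remove_common_elements_from_end(l1, l2):
--     # measure the common-suffix length in one pass, then truncate both lists in place
--     k = 0
--     n = min(len(l1), len(l2))
--     while k < n and l1[len(l1) - 1 - k] == l2[len(l2) - 1 - k]: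
--         k += 1
--     if k:
--         del l1[len(l1) - k:]
--         del l2[len(l2) - k:]
--     return l1, l2
-- ===== Notes on version B (the rewrite author's own statement) =====
-- stated objective: alternative
-- what changed: Replaces the interleaved pop-pop loop with a measure-then-slice decomposition: first count the common-suffix length k in one indexed pass, then truncate both lists once with del slices (same in-place mutation).
import Mathlib
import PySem

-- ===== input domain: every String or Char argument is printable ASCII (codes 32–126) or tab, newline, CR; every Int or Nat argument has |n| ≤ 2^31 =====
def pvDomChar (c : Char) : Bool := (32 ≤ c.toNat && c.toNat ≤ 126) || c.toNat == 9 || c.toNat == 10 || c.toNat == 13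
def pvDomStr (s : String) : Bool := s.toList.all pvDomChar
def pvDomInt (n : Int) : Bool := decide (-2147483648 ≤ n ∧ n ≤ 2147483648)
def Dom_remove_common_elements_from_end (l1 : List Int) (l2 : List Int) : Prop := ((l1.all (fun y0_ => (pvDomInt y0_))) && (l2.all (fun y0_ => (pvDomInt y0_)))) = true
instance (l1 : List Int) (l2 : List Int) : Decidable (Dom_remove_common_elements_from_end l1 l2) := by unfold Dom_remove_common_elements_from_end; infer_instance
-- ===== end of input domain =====

-- B replaces A's interleaved pop-pop loop by measure-then-slice: count the common-suffix
-- length k in one indexed pass, then truncate both lists once (same in-place mutation as A;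
-- the equivalence proved here is about the returned pair).


-- ===== PORT A =====
-- A: while the two (nonempty) lists end in the same element, pop both; then return them.
def remove_common_elements_from_end (l1 : List Int) (l2 : List Int) : List Int × List Int :=
  if _h : (0 < l1.length ∧ 0 < l2.length) ∧
         PySem.List.pyGet? l1 (-1) = PySem.List.pyGet? l2 (-1) then
    remove_common_elements_from_end l1.dropLast l2.dropLast
  else
    (l1, l2)
termination_by l1.length
decreasing_by
  have : l1 ≠ [] := by
    intro he; rw [he] at _h; simp at _h
  simpa [List.length_dropLast] using Nat.sub_lt (List.length_pos_iff.mpr this) Nat.one_pos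

-- ===== PORT B =====
-- B's counting loop: k starts at 0; while k < n and the k-th-from-the-end elements agree, k += 1.
def pvCountSuffix (l1 : List Int) (l2 : List Int) (n : Nat) (k : Nat) : Nat :=
  if h : k < n ∧ l1[l1.length - 1 - k]? = l2[l2.length - 1 - k]? then
    pvCountSuffix l1 l2 n (k + 1)
  else
    k
termination_by n - k

def remove_common_elements_from_end_alt (l1 : List Int) (l2 : List Int) : List Int × List Int :=
  let k := pvCountSuffix l1 l2 (min l1.length l2.length) 0
  (l1.take (l1.length - k), l2.take (l2.length - k))

-- ===== PRECONDITION & SPEC =====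
def Spec_remove_common_elements_from_end (l1 : List Int) (l2 : List Int) (out : List Int × List Int) : Prop := out = remove_common_elements_from_end_alt l1 l2
instance (l1 : List Int) (l2 : List Int) (out : List Int × List Int) : Decidable (Spec_remove_common_elements_from_end l1 l2 out) := by unfold Spec_remove_common_elements_from_end; infer_instance

-- ===== CLAIM (what is proved, stated in full; the proofs are below) =====
def Claim_equal_remove_common_elements_from_end : Prop := ∀ (l1 : List Int) (l2 : List Int), Dom_remove_common_elements_from_end l1 l2 → Spec_remove_common_elements_from_end l1 l2 (remove_common_elements_from_end l1 l2)

-- ===== LEMMAS AND PROOFS =====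

-- reference: common-prefix length of two (reversed) lists
def pvCS : List Int → List Int → Nat
  | a :: as, b :: bs => if a = b then pvCS as bs + 1 else 0
  | _, _ => 0

theorem pvCountSuffix_eq (l1 l2 : List Int) :
    ∀ k, k ≤ min l1.length l2.length →
      pvCountSuffix l1 l2 (min l1.length l2.length) k
        = k + pvCS (l1.reverse.drop k) (l2.reverse.drop k) := by
  intro k hk
  generalize hm : min l1.length l2.length - k = m
  induction m generalizing k with
  | zero =>
    have hkn : k = min l1.length l2.length := by omega
    rw [pvCountSuffix]
    have hnlt : ¬ (k < min l1.length l2.length) := by omega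
    rw [dif_neg (by simp [hnlt])]
    have : l1.reverse.drop k = [] ∨ l2.reverse.drop k = [] := by
      by_cases hle : l1.length ≤ l2.length
      · left; apply List.drop_eq_nil_of_le; simp; omega
      · right; apply List.drop_eq_nil_of_le; simp; omega
    rcases this with h | h <;> rw [h]
    · simp [pvCS]
    · cases l1.reverse.drop k <;> simp [pvCS]
  | succ m ih =>
    have hklt : k < min l1.length l2.length := by omega
    have hk1 : l1.length - 1 - k < l1.length := by omega
    have hk2 : l2.length - 1 - k < l2.length := by omega
    have hr1 : k < l1.reverse.length := by simp; omega
    have hr2 : k < l2.reverse.length := by simp; omega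
    have g1 : l1.reverse[k] = l1[l1.length - 1 - k] := by
      have := List.getElem?_reverse (by omega : k < l1.length)
      simpa [List.getElem?_eq_getElem hr1, List.getElem?_eq_getElem hk1] using this.symm
    have g2 : l2.reverse[k] = l2[l2.length - 1 - k] := by
      have := List.getElem?_reverse (by omega : k < l2.length)
      simpa [List.getElem?_eq_getElem hr2, List.getElem?_eq_getElem hk2] using this.symm
    have hval : (l1[l1.length - 1 - k]? = l2[l2.length - 1 - k]?)
        ↔ (l1[l1.length - 1 - k] = l2[l2.length - 1 - k]) := by
      simp [List.getElem?_eq_getElem hk1, List.getElem?_eq_getElem hk2]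
    have hd1 : l1.reverse.drop k = l1.reverse[k] :: l1.reverse.drop (k + 1) :=
      List.drop_eq_getElem_cons hr1
    have hd2 : l2.reverse.drop k = l2.reverse[k] :: l2.reverse.drop (k + 1) :=
      List.drop_eq_getElem_cons hr2
    rw [pvCountSuffix]
    by_cases heq : l1[l1.length - 1 - k] = l2[l2.length - 1 - k]
    · rw [dif_pos ⟨hklt, hval.mpr heq⟩, ih (k + 1) (by omega) (by omega)]
      rw [hd1, hd2]
      simp [pvCS, g1, g2, heq]
      omega
    · rw [dif_neg (by rintro ⟨-, hc⟩; exact heq (hval.mp hc))]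
      rw [hd1, hd2]
      simp [pvCS, g1, g2, heq]

theorem take_sub_eq_reverse_drop (l : List Int) (k : Nat) :
    l.take (l.length - k) = (l.reverse.drop k).reverse := by
  rw [List.reverse_drop]
  simp

theorem alt_eq_pvCS (l1 l2 : List Int) :
    remove_common_elements_from_end_alt l1 l2
      = ((l1.reverse.drop (pvCS l1.reverse l2.reverse)).reverse,
         (l2.reverse.drop (pvCS l1.reverse l2.reverse)).reverse) := by
  unfold remove_common_elements_from_end_alt
  rw [pvCountSuffix_eq l1 l2 0 (by omega)]
  simp [take_sub_eq_reverse_drop]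

theorem A_reverse : ∀ r1 r2 : List Int,
    remove_common_elements_from_end r1.reverse r2.reverse
      = ((r1.drop (pvCS r1 r2)).reverse, (r2.drop (pvCS r1 r2)).reverse) := by
  intro r1
  induction r1 with
  | nil =>
    intro r2
    rw [remove_common_elements_from_end]
    cases r2 <;> simp [pvCS]
  | cons a as ih =>
    intro r2
    cases r2 with
    | nil =>
      rw [remove_common_elements_from_end]
      simp [pvCS]
    | cons b bs =>
      rw [remove_common_elements_from_end]
      have g1 : PySem.List.pyGet? (a :: as).reverse (-1) = some a := by
        rw [PySem.List.pyGet?_neg_one]; simp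
      have g2 : PySem.List.pyGet? (b :: bs).reverse (-1) = some b := by
        rw [PySem.List.pyGet?_neg_one]; simp
      by_cases hab : a = b
      · rw [dif_pos ⟨⟨by simp, by simp⟩, by rw [g1, g2, hab]⟩]
        have d1 : (a :: as).reverse.dropLast = as.reverse := by simp
        have d2 : (b :: bs).reverse.dropLast = bs.reverse := by simp
        rw [d1, d2, ih bs]
        simp [pvCS, hab]
      · rw [dif_neg (by rintro ⟨-, hc⟩; rw [g1, g2] at hc; exact hab (by injection hc))]
        simp [pvCS, hab]

-- ===== VERDICT (by name: the statement is the Claim_ definition above) =====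
theorem remove_common_elements_from_end_spec : Claim_equal_remove_common_elements_from_end := by
  intro l1 l2 _
  unfold Spec_remove_common_elements_from_end
  rw [alt_eq_pvCS]
  have := A_reverse l1.reverse l2.reverse
  simpa using this
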